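-- pv_equiv track=rewrite | github.com/giangle-mfv/algorithm | misson/missions.py | calculateDay
-- ===== SOURCE A (Python) =====
-- def calculateDay(missions, limit):
--     dayMissions = []
--     necessaryDay = 1
--     for _, item in enumerate(missions):
--         if (isDayMissionValid(dayMissions, item, limit)):
--             dayMissions.append(item)
--         else:
--             necessaryDay += 1
--             dayMissions = [item]
--     return necessaryDay
--
-- def isDayMissionValid(passedMissions, mission, limit):
--     temp = list(passedMissions)
--     temp.append(mission)
--     if len(temp) <= 1:
--         return True
--     temp.sort()
--     return temp[-1] - temp[0] <= limit
-- ===== SOURCE B (Python) =====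
-- def calculateDay(missions, limit):
--     day = 1
--     bounds = None  # (lo, hi) of the current day's group
--     for m in missions:
--         if bounds is None:
--             bounds = (m, m)
--         else:
--             lo, hi = bounds
--             nlo, nhi = min(lo, m), max(hi, m)
--             if nhi - nlo <= limit:
--                 bounds = (nlo, nhi)
--             else:
--                 day += 1
--                 bounds = (m, m)
--     return day
-- ===== Notes on version B (the rewrite author's own statement) =====
-- stated objective: faster
-- what changed: B replaces A's per-element copy+sort of the whole current group with O(1) running (min,max) bounds per group, turning O(n*k log k) into O(n).
import Mathlib
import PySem

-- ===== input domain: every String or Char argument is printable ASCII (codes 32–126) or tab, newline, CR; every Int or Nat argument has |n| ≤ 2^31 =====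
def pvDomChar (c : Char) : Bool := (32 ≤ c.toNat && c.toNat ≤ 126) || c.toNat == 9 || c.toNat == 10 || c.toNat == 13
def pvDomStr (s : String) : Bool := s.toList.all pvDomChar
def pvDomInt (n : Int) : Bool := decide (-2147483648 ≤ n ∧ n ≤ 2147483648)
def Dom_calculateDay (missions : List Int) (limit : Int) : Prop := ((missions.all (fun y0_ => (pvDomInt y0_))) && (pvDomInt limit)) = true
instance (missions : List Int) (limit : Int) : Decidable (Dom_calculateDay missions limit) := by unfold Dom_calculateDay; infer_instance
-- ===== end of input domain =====

-- B maintains running (min,max) bounds of the current day's group instead of A's per-element copy+sort of the group.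

-- ===== PORT A =====
def isDayMissionValid (passedMissions : List Int) (mission : Int) (limit : Int) : Bool :=
  let temp := passedMissions ++ [mission]
  if temp.length ≤ 1 then true
  else
    let temp := PySem.List.sorted temp (fun x => x) false
    decide (PySem.List.pyGetD temp (-1) 0 - PySem.List.pyGetD temp 0 0 ≤ limit)

def calculateDay (missions : List Int) (limit : Int) : Int :=
  (missions.foldl
    (fun (st : List Int × Int) item =>
      if isDayMissionValid st.1 item limit then (st.1 ++ [item], st.2)
      else ([item], st.2 + 1))
    ([], 1)).2

-- ===== PORT B =====
def calculateDay_alt (missions : List Int) (limit : Int) : Int :=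
  (missions.foldl
    (fun (st : Option (Int × Int) × Int) m =>
      match st.1 with
      | none => (some (m, m), st.2)
      | some (lo, hi) =>
          let nlo := min lo m
          let nhi := max hi m
          if nhi - nlo ≤ limit then (some (nlo, nhi), st.2)
          else (some (m, m), st.2 + 1))
    (none, 1)).2

-- ===== PRECONDITION & SPEC =====
def Spec_calculateDay (missions : List Int) (limit : Int) (out : Int) : Prop := out = calculateDay_alt missions limit
instance (missions : List Int) (limit : Int) (out : Int) : Decidable (Spec_calculateDay missions limit out) := by unfold Spec_calculateDay; infer_instance

-- ===== CLAIM (what is proved, stated in full; the proofs are below) =====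
def Claim_equal_calculateDay : Prop := ∀ (missions : List Int) (limit : Int), Dom_calculateDay missions limit → Spec_calculateDay missions limit (calculateDay missions limit)

-- ===== LEMMAS AND PROOFS =====

-- in a ≤-pairwise list every element is at most the last one
theorem le_getLast_of_pairwise : ∀ (s : List Int) (h : s ≠ []), s.Pairwise (· ≤ ·) → ∀ y ∈ s, y ≤ s.getLast h
  | [x], _, _, y, hy => by simp at hy; simp [hy]
  | x :: z :: s, _, hp, y, hy => by
      rw [List.pairwise_cons] at hp
      rcases List.mem_cons.1 hy with rfl | hy
      · have := hp.1 ((z :: s).getLast (by simp)) (List.getLast_mem _)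
        simpa [List.getLast_cons] using this
      · simpa [List.getLast_cons] using le_getLast_of_pairwise (z :: s) (by simp) hp.2 y hy

-- A's sort-based validity test on a nonempty group is the running min/max range test
theorem isValid_eq_range (d : Int) (t : List Int) (m limit : Int) :
    isDayMissionValid (d :: t) m limit
      = decide (max ((d :: t).foldl max d) m - min ((d :: t).foldl min d) m ≤ limit) := by
  have hlen : ¬ ((d :: t) ++ [m]).length ≤ 1 := by simp
  unfold isDayMissionValid
  simp only [hlen, if_false]
  set temp := (d :: t) ++ [m] with htemp
  set s := PySem.List.sorted temp (fun x => x) false with hs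
  have hsne : s ≠ [] := by
    rw [hs, Ne, PySem.List.sorted_eq_nil_iff]; simp [htemp]
  have hperm : s.Perm temp := PySem.List.sorted_perm ..
  have hmemiff : ∀ y, y ∈ s ↔ y ∈ temp := fun y => hperm.mem_iff
  have hmin? : PySem.List.min? temp (fun y => y) = some ((t ++ [m]).foldl min d) := by
    rw [htemp]; exact PySem.List.min?_id_cons ..
  have hminmem : (t ++ [m]).foldl min d ∈ temp := PySem.List.min?_mem hmin?
  have hminlb : ∀ y ∈ temp, (t ++ [m]).foldl min d ≤ y := PySem.List.min?_isMin hmin?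
  have hmax? : PySem.List.max? temp (fun y => y) = some ((t ++ [m]).foldl max d) := by
    rw [htemp]; exact PySem.List.max?_id_cons ..
  have hmaxmem : (t ++ [m]).foldl max d ∈ temp := PySem.List.max?_mem hmax?
  have hmaxub : ∀ y ∈ temp, y ≤ (t ++ [m]).foldl max d := PySem.List.max?_isMax hmax?
  obtain ⟨h0, srest, hsc⟩ := List.exists_cons_of_ne_nil hsne
  have hhead : PySem.List.pyGetD s 0 0 = (t ++ [m]).foldl min d := by
    rw [hsc, PySem.List.pyGetD_zero_cons]
    have h1 : h0 ≤ (t ++ [m]).foldl min d := by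
      have := PySem.List.key_head_sorted_le _ _ (hs.symm.trans hsc)
      exact this _ hminmem
    have h2 : (t ++ [m]).foldl min d ≤ h0 := hminlb h0 ((hmemiff h0).1 (by rw [hsc]; simp))
    omega
  have hlast : PySem.List.pyGetD s (-1) 0 = (t ++ [m]).foldl max d := by
    rw [PySem.List.pyGetD_neg_one (h := hsne)]
    have hp : s.Pairwise (· ≤ ·) := by
      have := PySem.List.sorted_pairwise (xs := temp) (key := fun y => y)
      simpa [hs] using this
    have h1 : s.getLast hsne ≤ (t ++ [m]).foldl max d :=
      hmaxub _ ((hmemiff _).1 (List.getLast_mem hsne))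
    have h2 : (t ++ [m]).foldl max d ≤ s.getLast hsne :=
      le_getLast_of_pairwise s hsne hp _ ((hmemiff _).2 hmaxmem)
    omega
  rw [hhead, hlast]
  congr 1
  have hm : ((d :: t) ++ [m]).foldl min d = min ((d :: t).foldl min d) m := by
    simp [List.foldl_append]
  have hM : ((d :: t) ++ [m]).foldl max d = max ((d :: t).foldl max d) m := by
    simp [List.foldl_append]
  simp only [List.cons_append, List.foldl_cons, min_self, max_self] at hm hM
  simp only [List.foldl_cons, min_self, max_self]
  rw [hm, hM]

-- loop invariant: A's group list and B's (min,max) bounds stay in step and yield equal day counts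
theorem main_inv (limit : Int) : ∀ (ms : List Int) (d : Int) (t : List Int) (day : Int),
      (ms.foldl
        (fun (st : List Int × Int) item =>
          if isDayMissionValid st.1 item limit then (st.1 ++ [item], st.2)
          else ([item], st.2 + 1))
        (d :: t, day)).2
      = (ms.foldl
          (fun (st : Option (Int × Int) × Int) m =>
            match st.1 with
            | none => (some (m, m), st.2)
            | some (lo, hi) =>
                let nlo := min lo m
                let nhi := max hi m
                if nhi - nlo ≤ limit then (some (nlo, nhi), st.2)
                else (some (m, m), st.2 + 1))
          (some ((d :: t).foldl min d, (d :: t).foldl max d), day)).2 := by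
  intro ms
  induction ms with
  | nil => intro d t day; rfl
  | cons m rest ih =>
      intro d t day
      simp only [List.foldl_cons, isValid_eq_range, min_self, max_self]
      by_cases h : max (t.foldl max d) m - min (t.foldl min d) m ≤ limit
      · simp only [h, decide_true, if_true]
        have := ih d (t ++ [m]) day
        simp only [List.cons_append, List.foldl_cons, List.foldl_append, List.foldl_nil,
          min_self, max_self] at this ⊢
        exact this
      · simp only [h, decide_false, if_false]
        have := ih m [] (day + 1)
        simpa using this

-- ===== VERDICT (by name: the statement is the Claim_ definition above) =====
theorem calculateDay_spec : Claim_equal_calculateDay := by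
  intro missions limit _
  unfold Spec_calculateDay calculateDay calculateDay_alt
  cases missions with
  | nil => rfl
  | cons m rest =>
      have h0 : isDayMissionValid [] m limit = true := rfl
      simp only [List.foldl_cons, h0, if_true]
      have := main_inv limit rest m [] 1
      simpa using this
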